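-- pv_equiv track=rewrite | github.com/envomp/2018-Introduction-to-Programming | pr07_pyramid/pyramid.py | make_pyramid
-- ===== SOURCE A (Python) =====
-- def make_pyramid(base: int, char: str) -> list:
--     """
--     Construct a pyramid with given base.
--
--     Pyramid should consist of given chars, all empty spaces in the pyramid list are ' '.
--     Pyramid height depends on base length. Lowest floor consists of base-number chars.
--     Every floor has 2 chars less than the floor lower to it.
--     make_pyramid(3, "A") ->
--     [
--         [' ', 'A', ' '],
--         ['A', 'A', 'A']
--     ]
--     make_pyramid(6, 'a') ->
--     [
--         [' ', ' ', 'a', 'a', ' ', ' '],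
--         [' ', 'a', 'a', 'a', 'a', ' '],
--         ['a', 'a', 'a', 'a', 'a', 'a']
--     ]
--     :param base: int
--     :param char: str
--     :return: list
--     """
--     if base < 0:
--         return []
--
--     if base % 2:
--         return [[char if int((base - 1) / 2) - i <= j <= int((base - 1) / 2) + i else ' '
--                  for j in range(base)] for i in range(int((base - 1) / 2) + 1)]
--     else:
--         return [[char if int(base / 2) - 1 - i <= j <= int(base / 2) + i else ' '
--                  for j in range(base)] for i in range(int(base / 2))]
-- ===== SOURCE B (Python) =====
-- def make_pyramid(base: int, char: str) -> list:
--     """Same pyramid, built by run-length concatenation instead of a per-column scan."""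
--     if base < 0:
--         return []
--     if base % 2:
--         counts = [2 * i + 1 for i in range((base + 1) // 2)]
--     else:
--         counts = [2 * i + 2 for i in range(base // 2)]
--     rows = []
--     for count in counts:
--         pad = (base - count) // 2
--         rows.append([' '] * pad + [char] * count + [' '] * pad)
--     return rows
-- ===== Notes on version B (the rewrite author's own statement) =====
-- stated objective: simpler
-- what changed: Each row is built by run-length concatenation ([' ']*pad + [char]*count + [' ']*pad) from a precomputed per-floor char count, instead of A's nested comprehension testing a centered-interval inequality for every column.
import Mathlib
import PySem

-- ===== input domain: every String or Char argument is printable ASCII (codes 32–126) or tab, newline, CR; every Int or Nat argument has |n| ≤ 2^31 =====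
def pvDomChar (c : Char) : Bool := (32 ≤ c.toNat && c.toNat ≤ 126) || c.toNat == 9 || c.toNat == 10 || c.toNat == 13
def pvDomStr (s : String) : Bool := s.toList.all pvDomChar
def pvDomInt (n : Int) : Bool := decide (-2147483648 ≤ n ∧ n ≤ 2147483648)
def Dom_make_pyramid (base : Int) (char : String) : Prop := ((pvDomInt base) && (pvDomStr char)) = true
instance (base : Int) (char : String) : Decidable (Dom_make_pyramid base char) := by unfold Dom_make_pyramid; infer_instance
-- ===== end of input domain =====

-- B replaces A's per-column inequality scan by run-length row concatenation (pads + block of chars); objective: simpler.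

-- ===== PORT A =====
-- int((base-1)/2) / int(base/2): in the respective branch the division is exact
-- (base odd resp. even, base ≥ 0), so Int division `/` coincides with Python's value.
def make_pyramid (base : Int) (char : String) : List (List String) :=
  if base < 0 then []
  else if base % 2 ≠ 0 then
    (PySem.List.pyRange 0 ((base - 1) / 2 + 1) 1).map (fun i =>
      (PySem.List.pyRange 0 base 1).map (fun j =>
        if (base - 1) / 2 - i ≤ j ∧ j ≤ (base - 1) / 2 + i then char else " "))
  else
    (PySem.List.pyRange 0 (base / 2) 1).map (fun i =>
      (PySem.List.pyRange 0 base 1).map (fun j =>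
        if base / 2 - 1 - i ≤ j ∧ j ≤ base / 2 + i then char else " "))

-- ===== PORT B =====
def make_pyramid_alt (base : Int) (char : String) : List (List String) :=
  if base < 0 then []
  else
    let counts : List Int :=
      if base % 2 ≠ 0 then
        (PySem.List.pyRange 0 (PySem.Int.floordiv (base + 1) 2) 1).map (fun i => 2 * i + 1)
      else
        (PySem.List.pyRange 0 (PySem.Int.floordiv base 2) 1).map (fun i => 2 * i + 2)
    counts.map (fun count =>
      let pad := PySem.Int.floordiv (base - count) 2
      List.replicate pad.toNat " " ++ List.replicate count.toNat char ++ List.replicate pad.toNat " ")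

-- ===== PRECONDITION & SPEC =====
def Spec_make_pyramid (base : Int) (char : String) (out : List (List String)) : Prop := out = make_pyramid_alt base char
instance (base : Int) (char : String) (out : List (List String)) : Decidable (Spec_make_pyramid base char out) := by unfold Spec_make_pyramid; infer_instance

-- ===== CLAIM (what is proved, stated in full; the proofs are below) =====
def Claim_equal_make_pyramid : Prop := ∀ (base : Int) (char : String), Dom_make_pyramid base char → Spec_make_pyramid base char (make_pyramid base char)

-- ===== LEMMAS AND PROOFS =====

-- a map over a range on which f is constant is a replicate
theorem pv_map_const_on (a b : Int) (f : Int → String) (v : String)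
    (h : ∀ j : Int, a ≤ j → j < b → f j = v) :
    (PySem.List.pyRange a b 1).map f = List.replicate (b - a).toNat v := by
  rw [PySem.List.pyRange_one, List.map_map]
  apply List.eq_replicate_iff.mpr
  constructor
  · simp
  · intro s hs
    simp only [List.mem_map, List.mem_range, Function.comp] at hs
    obtain ⟨k, hk, rfl⟩ := hs
    exact h _ (by omega) (by omega)

-- A's row (condition lo ≤ j ≤ hi over range(n)) is pad/block/pad
theorem pv_row_eq (n lo hi : Int) (c : String)
    (h0 : 0 ≤ lo) (h1 : lo ≤ hi + 1) (h2 : hi + 1 ≤ n) :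
    (PySem.List.pyRange 0 n 1).map (fun j => if lo ≤ j ∧ j ≤ hi then c else " ")
      = List.replicate lo.toNat " " ++ List.replicate (hi + 1 - lo).toNat c
          ++ List.replicate (n - (hi + 1)).toNat " " := by
  rw [PySem.List.pyRange_one_append 0 lo n h0 (by omega),
      PySem.List.pyRange_one_append lo (hi + 1) n h1 h2,
      List.map_append, List.map_append]
  rw [pv_map_const_on 0 lo _ " " (fun j hj hj' => by simp; omega),
      pv_map_const_on lo (hi + 1) _ c (fun j hj hj' => by simp; omega),
      pv_map_const_on (hi + 1) n _ " " (fun j hj hj' => by simp; omega)]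
  simp only [List.append_assoc]
  congr 2
  omega

-- ===== VERDICT (by name: the statement is the Claim_ definition above) =====
theorem make_pyramid_spec : Claim_equal_make_pyramid := by
  intro base char _
  unfold Spec_make_pyramid make_pyramid make_pyramid_alt
  by_cases hneg : base < 0
  · simp [hneg]
  · simp only [if_neg hneg]
    rw [not_lt] at hneg
    by_cases hodd : base % 2 ≠ 0
    · simp only [if_pos hodd, List.map_map]
      rw [PySem.Int.floordiv_eq_ediv_of_pos (by omega)]
      have hm : (base + 1) / 2 = (base - 1) / 2 + 1 := by omega
      rw [hm]
      apply List.map_congr_left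
      intro i hi
      rw [PySem.List.mem_pyRange_one] at hi
      simp only [Function.comp]
      rw [pv_row_eq base ((base - 1) / 2 - i) ((base - 1) / 2 + i) char
            (by omega) (by omega) (by omega)]
      rw [PySem.Int.floordiv_eq_ediv_of_pos (by omega)]
      have hpar : base % 2 = 1 := by omega
      congr 2 <;> first | omega | (congr 1; omega)
    · simp only [if_neg hodd, List.map_map]
      rw [not_not] at hodd
      rw [PySem.Int.floordiv_eq_ediv_of_pos (by omega)]
      apply List.map_congr_left
      intro i hi
      rw [PySem.List.mem_pyRange_one] at hi
      simp only [Function.comp]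
      rw [pv_row_eq base (base / 2 - 1 - i) (base / 2 + i) char
            (by omega) (by omega) (by omega)]
      rw [PySem.Int.floordiv_eq_ediv_of_pos (by omega)]
      congr 2 <;> first | omega | (congr 1; omega)
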